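-- pv_equiv track=rewrite | github.com/sharathkumar49/learning | Python programs/pythonPrograms/restaurant_table_allocation.py | min_tables_binary_search
-- ===== SOURCE A (Python) =====
-- def can_allocate(groups, table_size, num_tables):
--     current_table = 0
--     current_sum = 0
--
--     for group in groups:
--         if current_sum + group > table_size:
--             current_table += 1
--             current_sum = group  # Start a new table with the current group
--             if current_table >= num_tables:  # If we exceed the number of tables, return False
--                 return False
--         else:
--             current_sum += group
--
--     return True  # All groups can be allocated within the given number of tables
--
-- def min_tables_binary_search(groups, table_size):
--     left, right = 1, len(groups)  # Minimum 1 table, maximum number of groups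
--     result = len(groups)
--
--     while left <= right:
--         mid = (left + right) // 2
--         if can_allocate(groups, table_size, mid):
--             result = mid
--             right = mid - 1  # Try to find fewer tables
--         else:
--             left = mid + 1  # Need more tables
--
--     return result
-- ===== SOURCE B (Python) =====
-- def min_tables_binary_search(groups, table_size):
--     # One greedy pass instead of binary search; cap at len(groups) as A does.
--     if not groups:
--         return 0
--     tables = 1
--     current = 0
--     for g in groups:
--         if current + g > table_size:
--             tables += 1
--             current = g
--         else:
--             current += g
--     return min(tables, len(groups))
-- ===== Notes on version B (the rewrite author's own statement) =====
-- stated objective: faster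
-- what changed: Replaced the binary search over can_allocate (which rescans all groups per probe) with a single greedy left-to-right pass counting table starts, capped by min(tables, len(groups)) exactly as A's search range caps it.
import Mathlib
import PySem

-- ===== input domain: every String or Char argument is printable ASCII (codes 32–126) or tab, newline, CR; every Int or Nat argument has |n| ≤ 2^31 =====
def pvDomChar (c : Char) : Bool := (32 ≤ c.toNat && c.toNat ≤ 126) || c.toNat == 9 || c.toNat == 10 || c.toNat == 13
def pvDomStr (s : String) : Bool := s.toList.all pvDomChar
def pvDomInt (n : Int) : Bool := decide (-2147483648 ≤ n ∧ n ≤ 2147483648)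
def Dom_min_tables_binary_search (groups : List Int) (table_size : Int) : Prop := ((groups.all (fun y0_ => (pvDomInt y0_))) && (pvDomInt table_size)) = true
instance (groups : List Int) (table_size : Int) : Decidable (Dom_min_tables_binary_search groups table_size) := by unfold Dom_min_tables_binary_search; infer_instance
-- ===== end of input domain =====

-- B replaces A's binary search over can_allocate by a single greedy pass (capped at len(groups)); objective: faster.


-- ===== PORT A =====
-- can_allocate's for-loop with early return, as structural recursion over the group list
def canAllocGo (table_size num_tables : Int) : List Int → Int → Int → Bool
  | [], _, _ => true
  | g :: gs, current_table, current_sum =>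
    if current_sum + g > table_size then
      if current_table + 1 ≥ num_tables then false
      else canAllocGo table_size num_tables gs (current_table + 1) g
    else canAllocGo table_size num_tables gs current_table (current_sum + g)

def can_allocate (groups : List Int) (table_size num_tables : Int) : Bool :=
  canAllocGo table_size num_tables groups 0 0

-- the while-loop of the binary search; terminates because right - left decreases
def bsLoop (groups : List Int) (table_size : Int) (left right result : Int) : Int :=
  if h : left ≤ right then
    let mid := PySem.Int.floordiv (left + right) 2
    if can_allocate groups table_size mid then
      bsLoop groups table_size left (mid - 1) mid
    else
      bsLoop groups table_size (mid + 1) right result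
  else result
termination_by (right + 1 - left).toNat
decreasing_by
  · have := PySem.Int.floordiv_two_mid_bounds h; omega
  · have := PySem.Int.floordiv_two_mid_bounds h; omega

def min_tables_binary_search (groups : List Int) (table_size : Int) : Int :=
  bsLoop groups table_size 1 (groups.length : Int) (groups.length : Int)

-- ===== PORT B =====
def min_tables_binary_search_alt (groups : List Int) (table_size : Int) : Int :=
  if groups = [] then 0
  else
    let st := groups.foldl
      (fun (st : Int × Int) g =>
        if st.2 + g > table_size then (st.1 + 1, g) else (st.1, st.2 + g))
      (1, 0)
    min st.1 (groups.length : Int)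

-- ===== PRECONDITION & SPEC =====
def Spec_min_tables_binary_search (groups : List Int) (table_size : Int) (out : Int) : Prop := out = min_tables_binary_search_alt groups table_size
instance (groups : List Int) (table_size : Int) (out : Int) : Decidable (Spec_min_tables_binary_search groups table_size out) := by unfold Spec_min_tables_binary_search; infer_instance

-- ===== CLAIM (what is proved, stated in full; the proofs are below) =====
def Claim_equal_min_tables_binary_search : Prop := ∀ (groups : List Int) (table_size : Int), Dom_min_tables_binary_search groups table_size → Spec_min_tables_binary_search groups table_size (min_tables_binary_search groups table_size)

-- ===== LEMMAS AND PROOFS =====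

-- final value of current_table of the greedy scan, ignoring the num_tables cutoff
def finalCT (table_size : Int) : List Int → Int → Int → Int
  | [], ct, _ => ct
  | g :: gs, ct, cs =>
    if cs + g > table_size then finalCT table_size gs (ct + 1) g
    else finalCT table_size gs ct (cs + g)

theorem finalCT_ge (ts : Int) (gs : List Int) (ct cs : Int) : ct ≤ finalCT ts gs ct cs := by
  induction gs generalizing ct cs with
  | nil => simp [finalCT]
  | cons g gs ih =>
    simp only [finalCT]
    split
    · exact le_trans (by omega) (ih (ct + 1) g)
    · exact ih ct (cs + g)

theorem canAllocGo_iff (ts num : Int) (gs : List Int) (ct cs : Int) (h : ct < num) :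
    canAllocGo ts num gs ct cs = true ↔ finalCT ts gs ct cs < num := by
  induction gs generalizing ct cs with
  | nil => simpa [canAllocGo, finalCT]
  | cons g gs ih =>
    simp only [canAllocGo, finalCT]
    split
    · split
      · rename_i h2
        have := finalCT_ge ts gs (ct + 1) g
        constructor
        · intro hc; simp at hc
        · omega
      · rename_i h2
        exact ih (ct + 1) g (by omega)
    · exact ih ct (cs + g) h

-- binary-search loop: finds T (= finalCT + 1) if it lies in [left, right], else returns result
theorem bsLoop_eq (groups : List Int) (ts : Int) (T : Int)
    (hT : ∀ k, 1 ≤ k → (can_allocate groups ts k = true ↔ T ≤ k)) :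
    ∀ left right result, 1 ≤ left → left ≤ T →
      bsLoop groups ts left right result = if T ≤ right then T else result := by
  intro left right result h1 hlT
  induction left, right, result using bsLoop.induct groups ts with
  | case1 l r res hlr mid hca ih =>
    have hb := PySem.Int.floordiv_two_mid_bounds hlr
    rw [bsLoop, dif_pos hlr]
    have hm : can_allocate groups ts mid = true := hca
    rw [hT mid (by omega)] at hm
    rw [if_pos hca, ih h1 hlT]
    split <;> split <;> omega
  | case2 l r res hlr mid hca ih =>
    have hb := PySem.Int.floordiv_two_mid_bounds hlr
    rw [bsLoop, dif_pos hlr]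
    have hm : ¬ (T ≤ mid) := by
      intro hTm
      exact absurd ((hT mid (by omega)).mpr hTm) (by simpa using hca)
    rw [if_neg hca, ih (by omega) (by omega)]
  | case3 l r res hlr =>
    rw [bsLoop, dif_neg hlr]
    split <;> omega

-- B's fold tracks (finalCT + 1, current_sum)
theorem fold_eq_finalCT (ts : Int) (gs : List Int) (t cs : Int) :
    gs.foldl (fun (st : Int × Int) g =>
        if st.2 + g > ts then (st.1 + 1, g) else (st.1, st.2 + g)) (t, cs)
      = (finalCT ts gs (t - 1) cs + 1, (gs.foldl (fun (st : Int × Int) g =>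
        if st.2 + g > ts then (st.1 + 1, g) else (st.1, st.2 + g)) (t, cs)).2) := by
  induction gs generalizing t cs with
  | nil => simp [finalCT]
  | cons g gs ih =>
    simp only [List.foldl_cons, finalCT]
    split
    · rw [ih (t + 1) g]; norm_num
    · exact ih t (cs + g)

theorem min_tables_eq (groups : List Int) (ts : Int) :
    min_tables_binary_search groups ts = min_tables_binary_search_alt groups ts := by
  set T : Int := finalCT ts groups 0 0 + 1 with hTdef
  have hT : ∀ k, 1 ≤ k → (can_allocate groups ts k = true ↔ T ≤ k) := by
    intro k hk
    unfold can_allocate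
    rw [canAllocGo_iff ts k groups 0 0 (by omega)]
    omega
  have hge := finalCT_ge ts groups 0 0
  unfold min_tables_binary_search
  rw [bsLoop_eq groups ts T hT 1 _ _ (by omega) (by omega)]
  unfold min_tables_binary_search_alt
  by_cases hnil : groups = []
  · subst hnil
    simp [finalCT] at hTdef ⊢
    omega
  · simp only [hnil, if_false]
    rw [fold_eq_finalCT]
    simp only
    have : (1 : Int) - 1 = 0 := by omega
    rw [this]
    rcases le_or_gt T (groups.length : Int) with h | h
    · simp only [h, if_true]; omega
    · simp only [h.not_ge, if_false]; omega

-- ===== VERDICT (by name: the statement is the Claim_ definition above) =====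
theorem min_tables_binary_search_spec : Claim_equal_min_tables_binary_search := by
  intro groups table_size _
  unfold Spec_min_tables_binary_search
  exact min_tables_eq groups table_size
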